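-- pv_equiv track=rewrite | github.com/ShaparakSalek/NRAP-Open-IAM-Dev | src/openiam/gu_interface/NRAP_OPENIAM.py | reformat_list_presentation
-- ===== SOURCE A (Python) =====
-- def reformat_list_presentation(val_list):
--     """ Reformat list representation for tooltip hints."""
--
--     quotient, remainder = divmod(len(val_list), 10)
--
--     S = '['
--     if len(val_list) >= 10:
--         for ind in range(quotient):
--             S = S + ', '.join([str(val) for val in val_list[ind*10:(ind+1)*10]]) + ',\n'
--
--     if remainder == 0:
--         S = S[0:-2] + ']'
--     else:
--         S = S + ', '.join([str(val) for val in val_list[quotient*10:]]) + ']'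
--
--     return S
-- ===== SOURCE B (Python) =====
-- def reformat_list_presentation(val_list):
--     """ Reformat list representation for tooltip hints."""
--     S = '['
--     for ind, val in enumerate(val_list):
--         S = S + str(val) + (',\n' if (ind + 1) % 10 == 0 else ', ')
--     return S[:-2] + ']'
-- ===== Notes on version B (the rewrite author's own statement) =====
-- stated objective: simpler
-- what changed: B replaces A's divmod/chunk-of-10 slicing with its remainder and full-chunk branches by a single element-wise enumerate loop with a modulo-10 separator test and one uniform trailing strip S[:-2] + ']'.
import Mathlib
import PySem

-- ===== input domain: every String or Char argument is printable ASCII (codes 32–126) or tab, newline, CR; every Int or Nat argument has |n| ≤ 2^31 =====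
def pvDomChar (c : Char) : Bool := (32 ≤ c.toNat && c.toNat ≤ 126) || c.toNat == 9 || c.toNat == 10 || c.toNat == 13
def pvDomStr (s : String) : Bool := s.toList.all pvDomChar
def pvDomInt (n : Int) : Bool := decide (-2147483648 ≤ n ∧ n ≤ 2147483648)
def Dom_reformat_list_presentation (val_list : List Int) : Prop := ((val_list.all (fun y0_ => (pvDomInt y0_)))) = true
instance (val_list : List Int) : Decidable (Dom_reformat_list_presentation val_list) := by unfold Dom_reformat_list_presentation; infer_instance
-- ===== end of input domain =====

-- B replaces A's chunk-of-10 slicing (divmod + remainder branch) by one element-wise loop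
-- with a modulo-10 separator test and a uniform trailing strip; same O(n) cost, simpler shape.

-- ===== PORT A =====
def reformat_list_presentation (val_list : List Int) : String :=
  let quotient : Int := PySem.Int.floordiv (PySem.List.len val_list) 10
  let remainder : Int := PySem.Int.mod (PySem.List.len val_list) 10
  let S : List Char := ['[']
  let S : List Char :=
    if PySem.List.len val_list ≥ 10 then
      (PySem.List.pyRange 0 quotient 1).foldl (fun S ind =>
        S ++ PySem.Chars.join [',', ' ']
              ((PySem.List.slice val_list (some (ind * 10)) (some ((ind + 1) * 10))).map PySem.Int.toChars)
          ++ [',', '\n']) S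
    else S
  let S : List Char :=
    if remainder = 0 then
      PySem.List.slice S (some 0) (some (-2)) ++ [']']
    else
      S ++ PySem.Chars.join [',', ' ']
            ((PySem.List.slice val_list (some (quotient * 10)) none).map PySem.Int.toChars)
        ++ [']']
  String.mk S

-- ===== PORT B =====
def reformat_list_presentation_alt (val_list : List Int) : String :=
  let S : List Char := (PySem.List.enumerate val_list 0).foldl
    (fun S p => S ++ PySem.Int.toChars p.2 ++
        (if PySem.Int.mod (p.1 + 1) 10 = 0 then [',', '\n'] else [',', ' '])) ['[']
  String.mk (PySem.List.slice S none (some (-2)) ++ [']'])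

-- ===== PRECONDITION & SPEC =====
def Spec_reformat_list_presentation (val_list : List Int) (out : String) : Prop := out = reformat_list_presentation_alt val_list
instance (val_list : List Int) (out : String) : Decidable (Spec_reformat_list_presentation val_list out) := by unfold Spec_reformat_list_presentation; infer_instance

-- ===== CLAIM (what is proved, stated in full; the proofs are below) =====
def Claim_equal_reformat_list_presentation : Prop := ∀ (val_list : List Int), Dom_reformat_list_presentation val_list → Spec_reformat_list_presentation val_list (reformat_list_presentation val_list)

-- ===== LEMMAS AND PROOFS =====

-- B's per-element separator: ',\n' after indices 9, 19, …, else ', '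
def sepOf (i : Int) : List Char := if PySem.Int.mod (i + 1) 10 = 0 then [',', '\n'] else [',', ' ']

-- what B's loop emits for the elements of xs starting at counter i
def emitC : List Int → Int → List Char
  | [], _ => []
  | v :: t, i => PySem.Int.toChars v ++ sepOf i ++ emitC t (i + 1)

-- A's ', '.join of the string forms
def joinC (ys : List Int) : List Char := PySem.Chars.join [',', ' '] (ys.map PySem.Int.toChars)

-- the concatenation of A's first q full chunks, each joined and terminated by ',\n'
def Gchunks : Nat → List Int → List Char
  | 0, _ => []
  | q + 1, ys => joinC (ys.take 10) ++ [',', '\n'] ++ Gchunks q (ys.drop 10)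

theorem sepOf_eq (i : Int) : sepOf i = if (i + 1) % 10 = 0 then [',', '\n'] else [',', ' '] := by
  unfold sepOf
  rw [PySem.Int.mod_eq_emod_of_pos (by norm_num : (0:Int) < 10)]

theorem sepOf_add_ten (i : Int) : sepOf (i + 10) = sepOf i := by
  rw [sepOf_eq, sepOf_eq]
  have : (i + 10 + 1) % 10 = (i + 1) % 10 := by omega
  rw [this]

theorem emitC_add_ten (t : List Int) : ∀ i : Int, emitC t (i + 10) = emitC t i := by
  induction t with
  | nil => intro i; rfl
  | cons v t ih =>
      intro i
      show PySem.Int.toChars v ++ sepOf (i + 10) ++ emitC t (i + 10 + 1) = _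
      rw [sepOf_add_ten]
      have : i + 10 + 1 = (i + 1) + 10 := by ring
      rw [this, ih]
      rfl

theorem emitC_append (a b : List Int) : ∀ i : Int,
    emitC (a ++ b) i = emitC a i ++ emitC b (i + a.length) := by
  induction a with
  | nil => intro i; simp [emitC]
  | cons v t ih =>
      intro i
      show PySem.Int.toChars v ++ sepOf i ++ emitC (t ++ b) (i + 1) = _
      rw [ih]
      have harith : i + 1 + (t.length : Int) = i + ((t.length : Int) + 1) := by ring
      show PySem.Int.toChars v ++ sepOf i ++ (emitC t (i + 1) ++ emitC b (i + 1 + (t.length : Int)))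
          = PySem.Int.toChars v ++ sepOf i ++ emitC t (i + 1) ++ emitC b (i + ((v :: t).length : Int))
      rw [harith]
      have hc : ((v :: t).length : Int) = (t.length : Int) + 1 := by push_cast [List.length_cons]; ring
      rw [hc]
      simp [List.append_assoc]

theorem sepOf_of_ne (i : Int) (h : (i + 1) % 10 ≠ 0) : sepOf i = [',', ' '] := by
  rw [sepOf_eq, if_neg h]

theorem emitC_join (c : List Int) : ∀ s : Nat, c ≠ [] → s + c.length ≤ 10 →
    emitC c (s : Int) = joinC c ++ (if s + c.length = 10 then [',', '\n'] else [',', ' ']) := by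
  induction c with
  | nil => intro s h; exact absurd rfl h
  | cons v t ih =>
      intro s _ hle
      cases t with
      | nil =>
          show PySem.Int.toChars v ++ sepOf s ++ emitC [] ((s : Int) + 1) = _
          have hj : joinC [v] = PySem.Int.toChars v := by
            simp [joinC, PySem.Chars.join_singleton]
          rw [hj]
          show PySem.Int.toChars v ++ sepOf s ++ [] = _
          by_cases h : s + 1 = 10
          · rw [sepOf_eq, if_pos (by omega), if_pos (by simpa using h)]
            simp
          · rw [sepOf_of_ne _ (by omega), if_neg (by simpa using h)]
            simp
      | cons w u =>
          show PySem.Int.toChars v ++ sepOf s ++ emitC (w :: u) ((s : Int) + 1) = _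
          have hlenc : (v :: w :: u).length = u.length + 2 := by simp
          have hlen2 : (w :: u).length = u.length + 1 := by simp
          rw [hlenc] at hle ⊢
          have hs1 : ((s : Int) + 1) = ((s + 1 : Nat) : Int) := by push_cast; ring
          rw [hs1, ih (s + 1) (by simp) (by omega)]
          rw [sepOf_of_ne _ (by omega)]
          have hcond : (s + 1 + (w :: u).length = 10) ↔ (s + (u.length + 2) = 10) := by
            rw [hlen2]; omega
          have hj : joinC (v :: w :: u)
              = PySem.Int.toChars v ++ [',', ' '] ++ joinC (w :: u) := by
            simp [joinC, PySem.Chars.join_cons_cons, List.append_assoc]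
          rw [hj]
          by_cases h : s + (u.length + 2) = 10
          · rw [if_pos (hcond.mpr h), if_pos h]; simp [List.append_assoc]
          · rw [if_neg (fun hc => h (hcond.mp hc)), if_neg h]; simp [List.append_assoc]

theorem emitC_eq_G : ∀ (q : Nat) (xs : List Int), 10 * q ≤ xs.length → xs.length < 10 * (q + 1) →
    emitC xs 0 = Gchunks q xs ++
      (if xs.length % 10 = 0 then [] else joinC (xs.drop (10 * q)) ++ [',', ' ']) := by
  intro q
  induction q with
  | zero =>
      intro xs _ hlt
      cases hxs : xs with
      | nil => simp [emitC, Gchunks]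
      | cons v t =>
          subst hxs
          have hne : (v :: t) ≠ [] := by simp
          have h0 : ((0 : Nat) : Int) = (0 : Int) := by norm_num
          rw [← h0, emitC_join (v :: t) 0 hne (by omega)]
          have hmod : (v :: t).length % 10 = (v :: t).length := Nat.mod_eq_of_lt (by omega)
          rw [if_neg (by omega), Gchunks]
          rw [hmod, if_neg (by simp)]
          simp
  | succ q ih =>
      intro xs hge hlt
      have hx : xs = xs.take 10 ++ xs.drop 10 := (List.take_append_drop 10 xs).symm
      have hlen10 : (xs.take 10).length = 10 := by
        rw [List.length_take]; omega
      calc emitC xs 0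
          = emitC (xs.take 10 ++ xs.drop 10) 0 := by rw [← hx]
        _ = emitC (xs.take 10) 0 ++ emitC (xs.drop 10) (0 + (xs.take 10).length) := by
              rw [emitC_append]
        _ = emitC (xs.take 10) 0 ++ emitC (xs.drop 10) 0 := by
              rw [hlen10]
              have h10 : emitC (xs.drop 10) ((0 : Int) + (10 : Nat)) = emitC (xs.drop 10) 0 := by
                simpa using emitC_add_ten (xs.drop 10) 0
              simpa using h10 ▸ rfl
        _ = _ := by
              have hj := emitC_join (xs.take 10) 0 (by
                    intro h; have := congrArg List.length h; simp [hlen10] at this)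
                  (by omega)
              norm_num [hlen10] at hj
              rw [hj]
              have hrec := ih (xs.drop 10) (by simp [List.length_drop]; omega)
                  (by simp [List.length_drop]; omega)
              rw [hrec]
              have hmod : (xs.drop 10).length % 10 = xs.length % 10 := by
                rw [List.length_drop]; omega
              have hdrop : (xs.drop 10).drop (10 * q) = xs.drop (10 * (q + 1)) := by
                rw [List.drop_drop]; ring_nf
              rw [hmod, hdrop, Gchunks]
              simp [List.append_assoc]

-- A's loop over range(quotient): foldl of chunk-appends equals Gchunks
theorem loopA (xs : List Int) : ∀ (q j : Nat) (acc : List Char),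
    (PySem.List.pyRange (j : Int) ((j : Int) + (q : Int)) 1).foldl
      (fun S ind => S ++ PySem.Chars.join [',', ' ']
          ((PySem.List.slice xs (some (ind * 10)) (some ((ind + 1) * 10))).map PySem.Int.toChars)
        ++ [',', '\n']) acc
    = acc ++ Gchunks q (xs.drop (j * 10)) := by
  intro q
  induction q with
  | zero =>
      intro j acc
      rw [PySem.List.pyRange_one_eq_nil (by omega)]
      simp [Gchunks]
  | succ q ih =>
      intro j acc
      rw [PySem.List.pyRange_one_cons (by push_cast; omega)]
      simp only [List.foldl_cons]
      have hslice : PySem.List.slice xs (some ((j : Int) * 10)) (some (((j : Int) + 1) * 10))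
          = (xs.drop (j * 10)).take 10 := by
        have h1 : ((j : Int) * 10) = ((j * 10 : Nat) : Int) := by push_cast; ring
        have h2 : (((j : Int) + 1) * 10) = ((j * 10 : Nat) : Int) + ((10 : Nat) : Int) := by
          push_cast; ring
        rw [h1, h2, PySem.List.slice_natCast_add]
      have harg : (j : Int) + ((q : Nat) + 1 : Int) = ((j + 1 : Nat) : Int) + (q : Int) := by
        push_cast; ring
      have harg2 : ((q + 1 : Nat) : Int) = ((q : Nat) : Int) + 1 := by push_cast; ring
      have hj1 : ((j : Int) + 1) = ((j + 1 : Nat) : Int) := by push_cast; ring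
      rw [hslice, harg2, harg, hj1, ih (j + 1)]
      rw [Gchunks]
      have hdrop : (xs.drop (j * 10)).drop 10 = xs.drop ((j + 1) * 10) := by
        rw [List.drop_drop]; ring_nf
      rw [← hdrop]
      simp [joinC, List.append_assoc]

theorem take_append_pair {α : Type} (a : List α) (x y : α) :
    (a ++ [x, y]).take ((a ++ [x, y]).length - 2) = a := by
  have h : (a ++ [x, y]).length - 2 = a.length := by simp
  rw [h, List.take_left]

-- two characters are stripped: emitC of a nonempty list ends in a 2-char separator
theorem emitC_ends (xs : List Int) (h : xs ≠ []) : ∀ i : Int,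
    ∃ (a : List Char) (x y : Char), emitC xs i = a ++ [x, y] := by
  induction xs with
  | nil => exact absurd rfl h
  | cons v t ih =>
      intro i
      cases ht : t with
      | nil =>
          subst ht
          refine ⟨PySem.Int.toChars v, (sepOf i)[0]!, (sepOf i)[1]!, ?_⟩
          show PySem.Int.toChars v ++ sepOf i ++ [] = _
          rw [sepOf_eq]
          split <;> simp
      | cons w u =>
          subst ht
          obtain ⟨a, x, y, hxy⟩ := ih (by simp) (i + 1)
          refine ⟨PySem.Int.toChars v ++ sepOf i ++ a, x, y, ?_⟩
          show PySem.Int.toChars v ++ sepOf i ++ emitC (w :: u) (i + 1) = _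
          rw [hxy]
          simp [List.append_assoc]

-- B's fold = '[' ++ emitC
theorem foldB (xs : List Int) : ∀ (s : Int) (acc : List Char),
    (PySem.List.enumerate xs s).foldl
      (fun S p => S ++ PySem.Int.toChars p.2 ++
          (if PySem.Int.mod (p.1 + 1) 10 = 0 then [',', '\n'] else [',', ' '])) acc
    = acc ++ emitC xs s := by
  induction xs with
  | nil => intro s acc; simp [PySem.List.enumerate_nil, emitC]
  | cons v t ih =>
      intro s acc
      rw [PySem.List.enumerate_cons]
      simp only [List.foldl_cons]
      rw [ih]
      show _ = acc ++ (PySem.Int.toChars v ++ sepOf s ++ emitC t (s + 1))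
      rw [sepOf]
      simp [List.append_assoc]

-- both ports, on a nonempty list, produce '[' :: (emitC xs 0 minus its last 2 chars) ++ "]"
theorem altP_eq (xs : List Int) (h : xs ≠ []) :
    reformat_list_presentation_alt xs
      = String.mk ('[' :: (emitC xs 0).take ((emitC xs 0).length - 2) ++ [']']) := by
  unfold reformat_list_presentation_alt
  dsimp only
  rw [foldB]
  obtain ⟨a, x, y, hxy⟩ := emitC_ends xs h 0
  rw [PySem.List.slice_to_neg_ofNat _ 2 (by omega)]
  congr 1
  rw [hxy]
  have h1 : ('[' :: (a ++ [x, y])).length - 2 = a.length + 1 := by simp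
  have h2 : ((a ++ [x, y]).length - 2) = a.length := by simp
  show (('[' :: (a ++ [x, y])).take (('[' :: (a ++ [x, y])).length - 2)) ++ [']'] = _
  rw [h1, h2, List.take_succ_cons, List.take_left]

theorem portA_eq (xs : List Int) (h : xs ≠ []) :
    reformat_list_presentation xs
      = String.mk ('[' :: (emitC xs 0).take ((emitC xs 0).length - 2) ++ [']']) := by
  unfold reformat_list_presentation
  dsimp only
  simp only [PySem.List.len_eq]
  set N : Nat := xs.length with hN
  have hNpos : 0 < N := List.length_pos_of_ne_nil h
  have hfd : PySem.Int.floordiv (N : Int) 10 = ((N / 10 : Nat) : Int) := by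
    exact_mod_cast PySem.Int.floordiv_natCast N 10
  have hmd : PySem.Int.mod (N : Int) 10 = ((N % 10 : Nat) : Int) := by
    exact_mod_cast PySem.Int.mod_natCast N 10
  rw [hfd, hmd]
  have hS1 : (if (N : Int) ≥ 10 then
      (PySem.List.pyRange 0 ((N / 10 : Nat) : Int) 1).foldl
        (fun S ind => S ++ PySem.Chars.join [',', ' ']
            ((PySem.List.slice xs (some (ind * 10)) (some ((ind + 1) * 10))).map PySem.Int.toChars)
          ++ [',', '\n']) ['[']
      else ['[']) = '[' :: Gchunks (N / 10) xs := by
    by_cases h10 : (N : Int) ≥ 10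
    · rw [if_pos h10]
      have := loopA xs (N / 10) 0 ['[']
      simpa using this
    · rw [if_neg h10]
      have hq : N / 10 = 0 := by omega
      rw [hq, Gchunks]
  rw [hS1]
  have hG := emitC_eq_G (N / 10) xs (by omega) (by omega)
  by_cases hr : N % 10 = 0
  · -- remainder 0: strip the final ',\n' of the last full chunk
    have hrI : ((N % 10 : Nat) : Int) = 0 := by exact_mod_cast hr
    rw [if_pos hrI]
    rw [hr, if_pos rfl] at hG
    simp only [List.append_nil] at hG
    have hq1 : ∃ q', N / 10 = q' + 1 := ⟨N / 10 - 1, by omega⟩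
    obtain ⟨q', hq'⟩ := hq1
    -- Gchunks (q'+1) ends in [',', '\n'] … we only need its length ≥ 2 and the take computation
    have hGend : ∃ (a : List Char) (x y : Char), Gchunks (N / 10) xs = a ++ [x, y] := by
      obtain ⟨a, x, y, hxy⟩ := emitC_ends xs h 0
      exact ⟨a, x, y, by rw [← hG, hxy]⟩
    obtain ⟨a, x, y, hxy⟩ := hGend
    rw [PySem.List.slice_zero_start, PySem.List.slice_to_neg_ofNat _ 2 (by omega)]
    congr 1
    rw [hxy, hG, hxy]
    have h1 : ('[' :: (a ++ [x, y])).length - 2 = a.length + 1 := by simp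
    have h2 : ((a ++ [x, y]).length - 2) = a.length := by simp
    show (('[' :: (a ++ [x, y])).take (('[' :: (a ++ [x, y])).length - 2)) ++ [']'] = _
    rw [h1, h2, List.take_succ_cons, List.take_left]
  · -- remainder ≠ 0: A appends the joined remainder chunk
    have hrI : ¬ ((N % 10 : Nat) : Int) = 0 := by exact_mod_cast hr
    rw [if_neg hrI]
    rw [if_neg hr] at hG
    have hslice : PySem.List.slice xs (some (((N / 10 : Nat) : Int) * 10)) none
        = xs.drop (10 * (N / 10)) := by
      have h1 : ((N / 10 : Nat) : Int) * 10 = ((10 * (N / 10) : Nat) : Int) := by push_cast; ring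
      rw [h1, PySem.List.slice_from_natCast]
    congr 1
    rw [hG]
    have hassoc : Gchunks (N / 10) xs ++ (joinC (xs.drop (10 * (N / 10))) ++ [',', ' '])
        = (Gchunks (N / 10) xs ++ joinC (xs.drop (10 * (N / 10)))) ++ [',', ' '] := by
      simp [List.append_assoc]
    rw [hassoc, take_append_pair, hslice]
    simp [joinC, List.append_assoc]

-- ===== VERDICT (by name: the statement is the Claim_ definition above) =====
theorem reformat_list_presentation_spec : Claim_equal_reformat_list_presentation := by
  intro xs _
  unfold Spec_reformat_list_presentation
  by_cases h : xs = []
  · subst h; rfl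
  · rw [portA_eq xs h, altP_eq xs h]
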